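-- pv_equiv track=rewrite | github.com/aaa2ppp/ya-algo-training6 | less2/j+/py/main.py | solve
-- ===== SOURCE A (Python) =====
-- def solve(aa, xx, k):
-- 	n, m = len(aa), len(xx)
--
-- 	bb = [0]*n
-- 	l, r, count = 0, 1, 0
--
-- 	while r < n:
-- 		if aa[r] < aa[r-1]:
-- 			l = r
-- 			count = 0
-- 		elif aa[r] == aa[r-1]:
-- 			count += 1
--
-- 		while count > k:
-- 			l +=1
-- 			if aa[l] == aa[l-1]:
-- 				count -= 1
--
-- 		bb[r] = l
-- 		r += 1
--
-- 	res = []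
-- 	for i in xx:
-- 		res.append(bb[i-1]+1) # to 0-indexing, to 1-indexing
--
-- 	return res
-- ===== SOURCE B (Python) =====
-- def solve(aa, xx, k):
-- 	# One pass: prefix count c of equal-adjacent pairs, first-occurrence table pos
-- 	# (pos[t] = first index j whose prefix count is t) and current run start rs;
-- 	# bb[r] is max(rs, pos[c-k]) -- no amortized shrink loop.
-- 	n = len(aa)
-- 	bb = [0]*n
-- 	pos = [0]
-- 	c = 0
-- 	rs = 0
-- 	for r in range(1, n):
-- 		if aa[r] < aa[r-1]:
-- 			rs = r
-- 		elif aa[r] == aa[r-1]: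
-- 			c += 1
-- 			pos.append(r)
-- 		t = c - k
-- 		bb[r] = max(rs, pos[t] if t > 0 else 0)
-- 	return [bb[i-1]+1 for i in xx]
-- ===== Notes on version B (the rewrite author's own statement) =====
-- stated objective: alternative
-- what changed: Replaces the amortized two-pointer window shrink (inner while moving l forward, decrementing a pair count) with a single pass that records, in a first-occurrence table, the first index attaining each prefix count of equal-adjacent pairs, and takes bb[r] = max(run_start, pos[c-k]) by direct table lookup.
import Mathlib
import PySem

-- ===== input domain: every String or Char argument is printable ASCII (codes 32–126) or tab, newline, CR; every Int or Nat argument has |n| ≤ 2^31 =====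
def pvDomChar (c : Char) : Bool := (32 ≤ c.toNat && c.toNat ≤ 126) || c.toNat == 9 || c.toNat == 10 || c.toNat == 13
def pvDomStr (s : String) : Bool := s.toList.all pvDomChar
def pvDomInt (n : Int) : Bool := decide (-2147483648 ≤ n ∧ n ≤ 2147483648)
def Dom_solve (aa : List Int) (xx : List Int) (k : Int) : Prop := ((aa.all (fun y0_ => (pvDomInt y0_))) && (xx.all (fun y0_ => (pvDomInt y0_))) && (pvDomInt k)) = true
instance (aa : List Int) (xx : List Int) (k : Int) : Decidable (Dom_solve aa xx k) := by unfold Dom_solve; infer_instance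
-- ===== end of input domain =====

-- B replaces A's amortized two-pointer shrink loop by a one-pass first-occurrence
-- table of prefix equal-pair counts plus a run-start tracker (objective: alternative).

-- ===== PORT A =====
-- A's inner 'while count > k' loop; fuel = len(aa) only totalizes the recursion
-- (under Pre_solve the loop stops before the fuel runs out).
def solveShrink (aa : List Int) (k : Int) : Nat → Nat → Int → Nat × Int
  | 0, l, count => (l, count)
  | fuel+1, l, count =>
    if k < count then
      -- l += 1; if aa[l] == aa[l-1]: count -= 1   (getD: in range under Pre_solve)
      solveShrink aa k fuel (l+1) (if aa.getD (l+1) 0 = aa.getD l 0 then count - 1 else count)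
    else (l, count)

-- one iteration of A's 'while r < n' loop; state (l, count, bb-values so far)
def solveStep (aa : List Int) (k : Int) (s : Nat × Int × List Int) (r : Nat) : Nat × Int × List Int :=
  let p : Nat × Int :=
    if aa.getD r 0 < aa.getD (r-1) 0 then (r, 0)
    else if aa.getD r 0 = aa.getD (r-1) 0 then (s.1, s.2.1 + 1)
    else (s.1, s.2.1)
  let q := solveShrink aa k aa.length p.1 p.2
  (q.1, q.2, s.2.2 ++ [(q.1 : Int)])

def solve (aa : List Int) (xx : List Int) (k : Int) : List Int :=
  let n := aa.length
  let st := (List.range' 1 (n-1)).foldl (solveStep aa k) (0, 0, [])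
  let bb : List Int := if n = 0 then [] else 0 :: st.2.2    -- bb[0] is never assigned
  xx.map (fun i => (PySem.List.pyGet? bb (i-1)).getD 0 + 1)

-- ===== PORT B =====
-- one iteration of B's loop; state (rs, c, pos, bb-values so far)
def solveAltStep (aa : List Int) (k : Int) (s : Nat × Nat × List Nat × List Int) (r : Nat) :
    Nat × Nat × List Nat × List Int :=
  let p : Nat × Nat × List Nat :=
    if aa.getD r 0 < aa.getD (r-1) 0 then (r, s.2.1, s.2.2.1)
    else if aa.getD r 0 = aa.getD (r-1) 0 then (s.1, s.2.1 + 1, s.2.2.1 ++ [r])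
    else (s.1, s.2.1, s.2.2.1)
  let t : Int := (p.2.1 : Int) - k
  let lmin : Nat := if 0 < t then p.2.2.getD t.toNat 0 else 0   -- pos[t] (in range under Pre_solve)
  (p.1, p.2.1, p.2.2, s.2.2.2 ++ [((max p.1 lmin : Nat) : Int)])

def solve_alt (aa : List Int) (xx : List Int) (k : Int) : List Int :=
  let n := aa.length
  let st := (List.range' 1 (n-1)).foldl (solveAltStep aa k) (0, 0, [0], [])
  let bb : List Int := if n = 0 then [] else 0 :: st.2.2.2
  xx.map (fun i => (PySem.List.pyGet? bb (i-1)).getD 0 + 1)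

-- ===== PRECONDITION & SPEC =====
-- Pre_ excludes only inputs where A raises IndexError: negative k with n ≥ 2 (the
-- shrink loop walks l past the end of aa) and query values outside [1-n, n].
def Pre_solve (aa : List Int) (xx : List Int) (k : Int) : Prop :=
  (0 ≤ k ∨ aa.length ≤ 1) ∧ ∀ x ∈ xx, 1 - (aa.length : Int) ≤ x ∧ x ≤ (aa.length : Int)
instance (aa : List Int) (xx : List Int) (k : Int) : Decidable (Pre_solve aa xx k) := by
  unfold Pre_solve; infer_instance

def pvWitness_solve : List Int × List Int × Int := ([3, 1, 1, 2, 2, 2], [1, 4, 6, 0, -5], 1)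

def Spec_solve (aa : List Int) (xx : List Int) (k : Int) (out : List Int) : Prop := out = solve_alt aa xx k
instance (aa : List Int) (xx : List Int) (k : Int) (out : List Int) : Decidable (Spec_solve aa xx k out) := by
  unfold Spec_solve; infer_instance

-- ===== CLAIM (what is proved, stated in full; the proofs are below) =====
def Claim_equal_solve : Prop := ∀ (aa : List Int) (xx : List Int) (k : Int),
  Dom_solve aa xx k → Pre_solve aa xx k → Spec_solve aa xx k (solve aa xx k)

-- ===== LEMMAS AND PROOFS =====

-- preC aa j = number of indices 1 ≤ i ≤ j with aa[i] == aa[i-1] (via getD, so it keeps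
-- increasing by 1 past the end of aa — used only for j < aa.length and for totality of firstGe)
def preC (aa : List Int) : Nat → Nat
  | 0 => 0
  | j+1 => preC aa j + (if aa.getD (j+1) 0 = aa.getD j 0 then 1 else 0)

-- start of the non-decreasing run containing index j
def rsC (aa : List Int) : Nat → Nat
  | 0 => 0
  | j+1 => if aa.getD (j+1) 0 < aa.getD j 0 then j+1 else rsC aa j

lemma preC_succ (aa : List Int) (j : Nat) :
    preC aa (j+1) = preC aa j + (if aa.getD (j+1) 0 = aa.getD j 0 then 1 else 0) := rfl

lemma rsC_succ (aa : List Int) (j : Nat) :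
    rsC aa (j+1) = if aa.getD (j+1) 0 < aa.getD j 0 then j+1 else rsC aa j := rfl

lemma preC_le_succ (aa : List Int) (j : Nat) : preC aa j ≤ preC aa (j+1) := by
  simp only [preC]; split <;> omega

lemma preC_mono (aa : List Int) {i j : Nat} (h : i ≤ j) : preC aa i ≤ preC aa j := by
  induction j with
  | zero => simp_all
  | succ j ih =>
    rcases Nat.lt_or_ge i (j+1) with h' | h'
    · exact le_trans (ih (by omega)) (preC_le_succ aa j)
    · have : i = j + 1 := by omega
      simp [this]

lemma preC_unbounded (aa : List Int) (t : Nat) : ∃ j, t ≤ preC aa j := by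
  refine ⟨aa.length + t, ?_⟩
  induction t with
  | zero => omega
  | succ t ih =>
    have h1 : aa.length ≤ aa.length + t := by omega
    have h2 : preC aa (aa.length + t + 1)
        = preC aa (aa.length + t) + 1 := by
      simp only [preC]
      rw [List.getD_eq_default _ _ (by omega), List.getD_eq_default _ _ (by omega)]
      simp
    have h3 : aa.length + (t + 1) = aa.length + t + 1 := by omega
    rw [h3]; omega

-- least index j with t ≤ preC aa j
def firstGe (aa : List Int) (t : Nat) : Nat := Nat.find (preC_unbounded aa t)

lemma firstGe_le_iff (aa : List Int) (t j : Nat) : firstGe aa t ≤ j ↔ t ≤ preC aa j := by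
  constructor
  · intro h
    exact le_trans (Nat.find_spec (preC_unbounded aa t)) (preC_mono aa h)
  · intro h
    exact Nat.find_le h

lemma firstGe_mono (aa : List Int) {t t' : Nat} (h : t ≤ t') : firstGe aa t ≤ firstGe aa t' := by
  rw [firstGe_le_iff]
  exact le_trans h ((firstGe_le_iff aa t' _).mp le_rfl)

lemma firstGe_zero (aa : List Int) : firstGe aa 0 = 0 := by
  have := (firstGe_le_iff aa 0 0).mpr (by omega)
  omega

-- target value (preC r - k).toNat and closed form of A's left pointer after step r
def tgtC (aa : List Int) (k : Int) (r : Nat) : Nat := ((preC aa r : Int) - k).toNat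

def lA (aa : List Int) (k : Int) (r : Nat) : Nat := max (rsC aa r) (firstGe aa (tgtC aa k r))

def bbL (aa : List Int) (k : Int) (m : Nat) : List Int :=
  (List.range' 1 m).map (fun r => ((lA aa k r : Nat) : Int))

lemma firstGe_tgt_le (aa : List Int) {k : Int} (hk : 0 ≤ k) (r : Nat) :
    firstGe aa (tgtC aa k r) ≤ r := by
  rw [firstGe_le_iff]
  have : ((preC aa r : Int) - k) ≤ (preC aa r : Int) := by omega
  unfold tgtC
  omega

lemma shrink_spec (aa : List Int) (k : Int) (R : Nat) (fuel l : Nat)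
    (hfuel : firstGe aa (tgtC aa k R) ≤ l + fuel) :
    solveShrink aa k fuel l ((preC aa R : Int) - (preC aa l : Int))
      = (max l (firstGe aa (tgtC aa k R)),
         (preC aa R : Int) - (preC aa (max l (firstGe aa (tgtC aa k R))) : Int)) := by
  induction fuel generalizing l with
  | zero =>
    have hle : firstGe aa (tgtC aa k R) ≤ l := by omega
    simp [solveShrink, Nat.max_eq_left hle]
  | succ fuel ih =>
    by_cases hc : k < (preC aa R : Int) - (preC aa l : Int)
    · -- preC l < target, so l < firstGe; take one shrink step
      have hpl : (preC aa l : Nat) < tgtC aa k R := by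
        unfold tgtC; omega
      have hlt : l < firstGe aa (tgtC aa k R) := by
        by_contra h
        have := (firstGe_le_iff aa (tgtC aa k R) l).mp (by omega)
        omega
      have hstep : (if aa.getD (l+1) 0 = aa.getD l 0
            then ((preC aa R : Int) - (preC aa l : Int)) - 1
            else (preC aa R : Int) - (preC aa l : Int))
          = (preC aa R : Int) - (preC aa (l+1) : Int) := by
        have : preC aa (l+1) = preC aa l + (if aa.getD (l+1) 0 = aa.getD l 0 then 1 else 0) := rfl
        rw [this]; split <;> push_cast <;> ring
      have hmax : max (l+1) (firstGe aa (tgtC aa k R)) = max l (firstGe aa (tgtC aa k R)) := by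
        omega
      simp only [solveShrink, if_pos hc, hstep]
      rw [ih (l+1) (by omega), hmax]
    · -- count ≤ k, loop exits; and firstGe ≤ l
      have hge : tgtC aa k R ≤ preC aa l := by
        unfold tgtC; omega
      have hle : firstGe aa (tgtC aa k R) ≤ l := (firstGe_le_iff aa _ l).mpr hge
      simp [solveShrink, if_neg hc, Nat.max_eq_left hle]

lemma fold_inv (aa : List Int) (k : Int) (hk : 0 ≤ k) (m : Nat) (hm : m < aa.length) :
    (List.range' 1 m).foldl (solveStep aa k) (0, 0, [])
        = (lA aa k m, (preC aa m : Int) - (preC aa (lA aa k m) : Int), bbL aa k m)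
  ∧ (List.range' 1 m).foldl (solveAltStep aa k) (0, 0, [0], [])
        = (rsC aa m, preC aa m, (List.range (preC aa m + 1)).map (firstGe aa), bbL aa k m) := by
  induction m with
  | zero =>
    have ht : tgtC aa k 0 = 0 := by unfold tgtC preC; omega
    have hl : lA aa k 0 = 0 := by unfold lA; rw [ht, firstGe_zero]; simp [rsC]
    refine ⟨?_, ?_⟩ <;>
      simp [hl, preC, rsC, bbL, firstGe_zero, List.range_succ]
  | succ m ih =>
    obtain ⟨hA, hB⟩ := ih (by omega)
    have hlen : m + 1 ≤ aa.length := by omega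
    have hconcat : List.range' 1 (m+1) = List.range' 1 m ++ [m+1] := by
      rw [List.range'_concat]; simp [Nat.add_comm]
    have hbbL : bbL aa k (m+1) = bbL aa k m ++ [((lA aa k (m+1) : Nat) : Int)] := by
      unfold bbL; rw [hconcat, List.map_append]; simp
    have hFle : firstGe aa (tgtC aa k (m+1)) ≤ m + 1 := firstGe_tgt_le aa hk (m+1)
    -- the value B appends equals firstGe of the target (table lookup)
    have hlmin : ∀ c : Nat,
        (if 0 < (c : Int) - k then
          ((List.range (c+1)).map (firstGe aa)).getD ((c : Int) - k).toNat 0 else 0)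
        = firstGe aa (((c : Int) - k).toNat) := by
      intro c
      by_cases hpos : 0 < (c : Int) - k
      · have hidx : ((c : Int) - k).toNat < c + 1 := by omega
        rw [if_pos hpos]
        simp [List.getD_eq_getElem?_getD, hidx]
      · have h0 : ((c : Int) - k).toNat = 0 := by omega
        rw [if_neg hpos, h0, firstGe_zero]
    by_cases hlt : aa.getD (m+1) 0 < aa.getD m 0
    · -- decrease: run restarts at m+1
      have hne : ¬ aa.getD (m+1) 0 = aa.getD m 0 := ne_of_lt hlt
      have hpre : preC aa (m+1) = preC aa m := by
        rw [preC_succ, if_neg hne]; omega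
      have hrs : rsC aa (m+1) = m + 1 := by rw [rsC_succ, if_pos hlt]
      have hshr := shrink_spec aa k (m+1) aa.length (m+1) (by omega)
      have hmax : max (m+1) (firstGe aa (tgtC aa k (m+1))) = lA aa k (m+1) := by
        unfold lA; rw [hrs]
      have h0 : (preC aa (m+1) : Int) - (preC aa (m+1) : Int) = 0 := by ring
      rw [h0] at hshr
      refine ⟨?_, ?_⟩
      · rw [hconcat, List.foldl_append, hA]
        simp only [List.foldl_cons, List.foldl_nil, solveStep, Nat.add_sub_cancel,
          if_pos hlt, hshr, hmax, hbbL]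
      · rw [hconcat, List.foldl_append, hB]
        simp only [List.foldl_cons, List.foldl_nil, solveAltStep, Nat.add_sub_cancel, Prod.mk.injEq,
          if_pos hlt, hlmin, hpre, hrs, hbbL]
        refine ⟨trivial, trivial, trivial, ?_⟩
        unfold lA tgtC
        rw [hrs, hpre]
    · by_cases heq : aa.getD (m+1) 0 = aa.getD m 0
      · -- equal pair: count (resp. c) grows by one, pos gains m+1
        have hpre : preC aa (m+1) = preC aa m + 1 := by rw [preC_succ, if_pos heq]
        have hrs : rsC aa (m+1) = rsC aa m := by rw [rsC_succ, if_neg hlt]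
        have htmono : tgtC aa k m ≤ tgtC aa k (m+1) := by unfold tgtC; omega
        have hshr := shrink_spec aa k (m+1) aa.length (lA aa k m) (by omega)
        have hcnt : (preC aa (m+1) : Int) - (preC aa (lA aa k m) : Int)
            = ((preC aa m : Int) - (preC aa (lA aa k m) : Int)) + 1 := by
          rw [hpre]; push_cast; ring
        rw [hcnt] at hshr
        have hmax : max (lA aa k m) (firstGe aa (tgtC aa k (m+1))) = lA aa k (m+1) := by
          unfold lA
          rw [hrs, Nat.max_assoc, Nat.max_eq_right (firstGe_mono aa htmono)]
        have hFnew : firstGe aa (preC aa m + 1) = m + 1 := by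
          have h1 : firstGe aa (preC aa m + 1) ≤ m + 1 :=
            (firstGe_le_iff aa _ _).mpr (by omega)
          have h2 : ¬ firstGe aa (preC aa m + 1) ≤ m := by
            intro h
            have := (firstGe_le_iff aa (preC aa m + 1) m).mp h
            omega
          omega
        refine ⟨?_, ?_⟩
        · rw [hconcat, List.foldl_append, hA]
          simp only [List.foldl_cons, List.foldl_nil, solveStep, Nat.add_sub_cancel,
            if_neg hlt, if_pos heq, hshr, hmax, hbbL]
        · rw [hconcat, List.foldl_append, hB]
          simp only [List.foldl_cons, List.foldl_nil, solveAltStep, Nat.add_sub_cancel, Prod.mk.injEq,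
            if_neg hlt, if_pos heq, hbbL]
          refine ⟨hrs.symm, hpre.symm, ?_, ?_⟩
          · rw [hpre, List.range_succ (n := preC aa m + 1), List.map_append]
            simp [hFnew]
          · have hpos2 : List.map (firstGe aa) (List.range (preC aa m + 1)) ++ [m+1]
                = List.map (firstGe aa) (List.range (preC aa m + 1 + 1)) := by
              rw [List.range_succ (n := preC aa m + 1), List.map_append]
              simp [hFnew]
            unfold lA tgtC
            rw [hrs, hpre, hpos2, hlmin (preC aa m + 1)]
      · -- strict increase: nothing changes
        have hpre : preC aa (m+1) = preC aa m := by
          rw [preC_succ, if_neg heq]; omega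
        have hrs : rsC aa (m+1) = rsC aa m := by rw [rsC_succ, if_neg hlt]
        have htgt : tgtC aa k (m+1) = tgtC aa k m := by unfold tgtC; rw [hpre]
        have hshr := shrink_spec aa k (m+1) aa.length (lA aa k m) (by omega)
        have hcnt : (preC aa (m+1) : Int) - (preC aa (lA aa k m) : Int)
            = (preC aa m : Int) - (preC aa (lA aa k m) : Int) := by rw [hpre]
        rw [hcnt] at hshr
        have hmax : max (lA aa k m) (firstGe aa (tgtC aa k (m+1))) = lA aa k (m+1) := by
          unfold lA
          rw [hrs, htgt, Nat.max_assoc, Nat.max_self]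
        refine ⟨?_, ?_⟩
        · rw [hconcat, List.foldl_append, hA]
          simp only [List.foldl_cons, List.foldl_nil, solveStep, Nat.add_sub_cancel,
            if_neg hlt, if_neg heq, hshr, hmax, hbbL]
        · rw [hconcat, List.foldl_append, hB]
          simp only [List.foldl_cons, List.foldl_nil, solveAltStep, Nat.add_sub_cancel, Prod.mk.injEq,
            if_neg hlt, if_neg heq, hlmin, hpre, hrs, hbbL]
          refine ⟨trivial, trivial, trivial, ?_⟩
          unfold lA tgtC
          rw [hrs, hpre]

-- ===== VERDICT (by name: the statement is the Claim_ definition above) =====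
theorem solve_spec : Claim_equal_solve := by
  intro aa xx k _ hpre
  unfold Spec_solve solve solve_alt
  have key : (if aa.length = 0 then ([] : List Int)
        else 0 :: ((List.range' 1 (aa.length-1)).foldl (solveStep aa k) (0, 0, [])).2.2)
      = (if aa.length = 0 then ([] : List Int)
        else 0 :: ((List.range' 1 (aa.length-1)).foldl (solveAltStep aa k) (0, 0, [0], [])).2.2.2) := by
    rcases Nat.lt_or_ge aa.length 2 with hsmall | hbig
    · have h0 : aa.length - 1 = 0 := by omega
      rw [h0]
      simp [List.range']
    · have hk : 0 ≤ k := by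
        rcases hpre.1 with h | h
        · exact h
        · omega
      have h := fold_inv aa k hk (aa.length - 1) (by omega)
      rw [h.1, h.2]
  simp only [key]
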